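-- pv_equiv track=rewrite | github.com/felipenjaneiro-ctrl/agrimacro | pipeline/build_trade_skill.py | resolve_underlying
-- ===== SOURCE A (Python) =====
-- KNOWN_ROOTS = [
--     "ZC", "ZS", "ZW", "ZM", "ZL", "KE",
--     "LE", "GF", "HE",
--     "SB", "KC", "CT", "CC", "OJ",
--     "CL", "NG",
--     "GC", "SI",
--     "DX",
-- ]
--
-- def resolve_underlying(symbol):
--     """
--     Map IBKR symbol to canonical underlying root.
--     Handles:
--       - FOP: "CC JAN26 5000 P" -> "CC"
--       - FUT: "CCK5" -> "CC"
--       - Simple: "CL" -> "CL"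
--     """
--     sym = symbol.strip()
--
--     # FOP format: "CC JAN26 5000 P" — take first token
--     if " " in sym:
--         first = sym.split()[0]
--         # First token might be like "OZCN6" (option on ZC) — strip O prefix
--         if first.startswith("O") and len(first) >= 3:
--             candidate = first[1:3]
--             if candidate in KNOWN_ROOTS:
--                 return candidate
--         # Otherwise check 2-char prefix
--         for root in KNOWN_ROOTS:
--             if first == root or first.startswith(root):
--                 return root
--         return first[:2]
--
--     # Futures format: "CCK5", "ZSN6", "CLF25"
--     for root in sorted(KNOWN_ROOTS, key=len, reverse=True):
--         if sym.startswith(root):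
--             return root
--
--     return sym[:2] if len(sym) >= 2 else sym
-- ===== SOURCE B (Python) =====
-- KNOWN_ROOTS = [
--     "ZC", "ZS", "ZW", "ZM", "ZL", "KE",
--     "LE", "GF", "HE",
--     "SB", "KC", "CT", "CC", "OJ",
--     "CL", "NG",
--     "GC", "SI",
--     "DX",
-- ]
--
-- # Every root is exactly 2 characters, so A's scans over KNOWN_ROOTS always
-- # reduce to "take the first two characters"; only the O-prefix membership
-- # test remains observable.
-- def resolve_underlying(symbol):
--     sym = symbol.strip()
--     if " " in sym:
--         first = sym.split()[0]
--         if first.startswith("O") and len(first) >= 3 and first[1:3] in KNOWN_ROOTS: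
--             return first[1:3]
--         return first[:2]
--     return sym[:2] if len(sym) >= 2 else sym
-- ===== Notes on version B (the rewrite author's own statement) =====
-- stated objective: simpler
-- what changed: Both scans over KNOWN_ROOTS (the list-order prefix loop and the length-sorted startswith loop) are removed: since every root is exactly two characters, each scan provably returns the first two characters, so B computes the result by direct slicing with a single membership test for the O-prefix case.
import Mathlib
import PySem

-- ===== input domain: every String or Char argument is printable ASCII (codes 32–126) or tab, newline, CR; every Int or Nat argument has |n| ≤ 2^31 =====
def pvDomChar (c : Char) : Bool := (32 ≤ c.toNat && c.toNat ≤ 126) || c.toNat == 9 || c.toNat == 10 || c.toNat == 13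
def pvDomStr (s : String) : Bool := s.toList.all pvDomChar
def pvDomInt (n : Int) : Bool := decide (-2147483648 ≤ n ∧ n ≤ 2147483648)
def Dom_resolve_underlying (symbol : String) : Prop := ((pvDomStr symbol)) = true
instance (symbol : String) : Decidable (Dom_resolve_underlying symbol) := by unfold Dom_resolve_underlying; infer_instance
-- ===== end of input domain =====

set_option maxHeartbeats 1000000


-- B removes A's two scans over KNOWN_ROOTS (every root is exactly two characters, so each
-- scan returns the first two characters) and computes the result by direct slicing: simpler.

-- module constant KNOWN_ROOTS (shared helper of both programs)
def knownRoots : List String :=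
  ["ZC", "ZS", "ZW", "ZM", "ZL", "KE",
   "LE", "GF", "HE",
   "SB", "KC", "CT", "CC", "OJ",
   "CL", "NG",
   "GC", "SI",
   "DX"]

-- ===== PORT A =====
-- 'for root in KNOWN_ROOTS: if first == root or first.startswith(root): return root'
def ruLoopFop (first : String) : List String → Option String
  | [] => none
  | r :: rs =>
    if first == r || PySem.Str.startswith first r then some r else ruLoopFop first rs

-- 'for root in sorted(KNOWN_ROOTS, key=len, reverse=True): if sym.startswith(root): return root'
def ruLoopFut (sym : String) : List String → Option String
  | [] => none
  | r :: rs => if PySem.Str.startswith sym r then some r else ruLoopFut sym rs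

def resolve_underlying (symbol : String) : String :=
  let sym := PySem.Str.strip symbol
  if PySem.Str.isIn " " sym then
    -- sym.split()[0]: the list is provably nonempty (sym is stripped and contains ' '),
    -- so Python's [0] never raises; headD "" is exact here.
    let first := (PySem.Str.split₀ sym).headD ""
    -- the code after the O-prefix special case (fall-through target)
    let rest :=
      match ruLoopFop first knownRoots with
      | some r => r
      | none => PySem.Str.slice first none (some 2)
    if PySem.Str.startswith first "O" && decide (3 ≤ PySem.Str.len first) then
      let candidate := PySem.Str.slice first (some 1) (some 3)
      if knownRoots.contains candidate then candidate else rest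
    else rest
  else
    match ruLoopFut sym (PySem.List.sorted knownRoots (fun r => PySem.Str.len r) true) with
    | some r => r
    | none => if 2 ≤ PySem.Str.len sym then PySem.Str.slice sym none (some 2) else sym

-- ===== PORT B =====
def resolve_underlying_alt (symbol : String) : String :=
  let sym := PySem.Str.strip symbol
  if PySem.Str.isIn " " sym then
    let first := (PySem.Str.split₀ sym).headD ""  -- sym.split()[0]; see note in port A
    if PySem.Str.startswith first "O" && decide (3 ≤ PySem.Str.len first)
        && knownRoots.contains (PySem.Str.slice first (some 1) (some 3)) then
      PySem.Str.slice first (some 1) (some 3)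
    else
      PySem.Str.slice first none (some 2)
  else
    if 2 ≤ PySem.Str.len sym then PySem.Str.slice sym none (some 2) else sym

-- ===== PRECONDITION & SPEC =====
def Spec_resolve_underlying (symbol : String) (out : String) : Prop := out = resolve_underlying_alt symbol
instance (symbol : String) (out : String) : Decidable (Spec_resolve_underlying symbol out) := by unfold Spec_resolve_underlying; infer_instance

-- ===== CLAIM (what is proved, stated in full; the proofs are below) =====
def Claim_equal_resolve_underlying : Prop := ∀ (symbol : String), Dom_resolve_underlying symbol → Spec_resolve_underlying symbol (resolve_underlying symbol)

-- ===== LEMMAS AND PROOFS =====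

-- a 2-character prefix r of s: s[:2] = r and len s ≥ 2
theorem two_char_prefix (r s : String) (hlen : r.toList.length = 2)
    (h : PySem.Str.startswith s r = true) :
    PySem.Str.slice s none (some 2) = r ∧ 2 ≤ PySem.Str.len s := by
  have hpre : r.toList <+: s.toList := by
    have he := PySem.Str.startswith_eq s r
    rw [he] at h
    exact (PySem.Chars.startswith_iff _ _).mp h
  obtain ⟨t, ht⟩ := hpre
  constructor
  · have : (PySem.Str.slice s none (some 2)).toList = s.toList.take 2 := by
      rw [PySem.Str.toList_slice, PySem.Chars.slice_eq_listSlice]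
      have h2 : ((2 : Int)) = ((2 : Nat) : Int) := rfl
      rw [h2, PySem.List.slice_to_natCast]
    have htake : s.toList.take 2 = r.toList := by
      rw [← ht, ← hlen, List.take_left]
    have : (PySem.Str.slice s none (some 2)).toList = r.toList := by rw [this, htake]
    exact String.toList_injective this
  · have := congrArg List.length ht
    simp [PySem.Str.len_eq, hlen] at *
    omega

theorem slice_self_of_len_two (r : String) (hlen : r.toList.length = 2) :
    PySem.Str.slice r none (some 2) = r := by
  apply String.toList_injective
  rw [PySem.Str.toList_slice, PySem.Chars.slice_eq_listSlice]
  have h2 : ((2 : Int)) = ((2 : Nat) : Int) := rfl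
  rw [h2, PySem.List.slice_to_natCast, ← hlen, List.take_length]

theorem knownRoots_len_two : ∀ r ∈ knownRoots, r.toList.length = 2 := by decide

-- A's FOP loop always produces first[:2]
theorem ruLoopFop_eval (first : String) (roots : List String)
    (hlen : ∀ r ∈ roots, r.toList.length = 2) :
    (match ruLoopFop first roots with
     | some r => r
     | none => PySem.Str.slice first none (some 2)) = PySem.Str.slice first none (some 2) := by
  induction roots with
  | nil => simp [ruLoopFop]
  | cons r rs ih =>
    have hr : r.toList.length = 2 := hlen r (by simp)
    by_cases hc : (first == r || PySem.Str.startswith first r) = true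
    · simp only [ruLoopFop, hc, if_true]
      rcases Bool.or_eq_true_iff.mp hc with h | h
      · have : first = r := by exact_mod_cast (beq_iff_eq).mp h
        subst this
        exact (slice_self_of_len_two first hr).symm
      · exact ((two_char_prefix r first hr h).1).symm
    · simp only [ruLoopFop, hc]
      simp only [Bool.not_eq_true] at hc
      rw [if_neg (by simp [hc])]
      exact ih (fun x hx => hlen x (by simp [hx]))

-- A's FUT loop followed by its fallback equals B's direct expression
theorem ruLoopFut_eval (sym : String) (roots : List String)
    (hlen : ∀ r ∈ roots, r.toList.length = 2) :
    (match ruLoopFut sym roots with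
     | some r => r
     | none => if 2 ≤ PySem.Str.len sym then PySem.Str.slice sym none (some 2) else sym) =
    (if 2 ≤ PySem.Str.len sym then PySem.Str.slice sym none (some 2) else sym) := by
  induction roots with
  | nil => simp [ruLoopFut]
  | cons r rs ih =>
    have hr : r.toList.length = 2 := hlen r (by simp)
    by_cases hc : PySem.Str.startswith sym r = true
    · obtain ⟨hsl, hge⟩ := two_char_prefix r sym hr hc
      simp only [ruLoopFut, hc, if_true, if_pos hge, hsl]
    · simp only [ruLoopFut, hc]
      rw [if_neg (by simp [hc])]
      exact ih (fun x hx => hlen x (by simp [hx]))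

-- sorting the 19 two-character roots by length (reverse) leaves them in place
theorem sorted_knownRoots :
    PySem.List.sorted knownRoots (fun r => PySem.Str.len r) true = knownRoots := by decide

-- ===== VERDICT (by name: the statement is the Claim_ definition above) =====
theorem resolve_underlying_spec : Claim_equal_resolve_underlying := by
  intro symbol _
  unfold Spec_resolve_underlying
  simp only [resolve_underlying, resolve_underlying_alt]
  set sym := PySem.Str.strip symbol with hsym
  by_cases hsp : PySem.Str.isIn " " sym = true
  · simp only [hsp, if_true]
    set first := (PySem.Str.split₀ sym).headD "" with hfirst
    have hrest := ruLoopFop_eval first knownRoots knownRoots_len_two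
    rw [hrest]
    by_cases h1 : (PySem.Str.startswith first "O" && decide (3 ≤ PySem.Str.len first)) = true
    · by_cases hm : knownRoots.contains (PySem.Str.slice first (some 1) (some 3)) = true
      · simp only [h1, hm, Bool.true_and, if_true]
      · rw [Bool.not_eq_true] at hm
        simp only [h1, Bool.true_and, hm, Bool.false_eq_true, if_false, if_true]
    · rw [Bool.not_eq_true] at h1
      simp only [h1, Bool.false_and, Bool.false_eq_true, if_false]
  · rw [Bool.not_eq_true] at hsp
    simp only [hsp, Bool.false_eq_true, if_false]
    rw [sorted_knownRoots]
    exact ruLoopFut_eval sym knownRoots knownRoots_len_two
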